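-- pv_equiv track=rewrite | github.com/pypi-data/pypi-mirror-356 | packages/aetherpost/aetherpost-1.2.0-py3-none-any.whl/aetherpost/cli/commands/init.py | create_env_template
-- ===== SOURCE A (Python) =====
-- from typing import Optional, List
--
-- def create_env_template(platforms: List[str], ai_services: List[str]) -> str:
--     """Create .env template file."""
--     content = """# AetherPost Environment Configuration
-- # Copy this file to .env.aetherpost and add your actual API keys
--
-- # ===========================================
-- # PLATFORM CREDENTIALS
-- # ===========================================
--
-- """
--
--     for platform in platforms:
--         content += f"# {platform.upper()}\n"
--         if platform == "twitter":
--             content += """TWITTER_API_KEY=your_api_key_here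
-- TWITTER_API_SECRET=your_api_secret_here
-- TWITTER_ACCESS_TOKEN=your_access_token_here
-- TWITTER_ACCESS_TOKEN_SECRET=your_access_token_secret_here
-- TWITTER_BEARER_TOKEN=your_bearer_token_here
--
-- """
--         elif platform == "instagram":
--             content += """INSTAGRAM_APP_ID=your_app_id_here
-- INSTAGRAM_APP_SECRET=your_app_secret_here
-- INSTAGRAM_ACCESS_TOKEN=your_access_token_here
--
-- """
--         elif platform == "youtube":
--             content += """YOUTUBE_API_KEY=your_api_key_here
-- YOUTUBE_CLIENT_ID=your_client_id_here
-- YOUTUBE_CLIENT_SECRET=your_client_secret_here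
-- YOUTUBE_CHANNEL_ID=your_channel_id_here
--
-- """
--         elif platform == "tiktok":
--             content += """TIKTOK_CLIENT_KEY=your_client_key_here
-- TIKTOK_CLIENT_SECRET=your_client_secret_here
-- TIKTOK_ACCESS_TOKEN=your_access_token_here
--
-- """
--         elif platform == "reddit":
--             content += """REDDIT_CLIENT_ID=your_client_id_here
-- REDDIT_CLIENT_SECRET=your_client_secret_here
-- REDDIT_USERNAME=your_username_here
-- REDDIT_PASSWORD=your_password_here
--
-- """
--
--     content += """
-- # ===========================================
-- # AI SERVICES
-- # ===========================================
--
-- """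
--
--     for service in ai_services:
--         content += f"{service.upper()}_API_KEY=your_{service}_api_key_here\n"
--
--     content += """
-- # ===========================================
-- # INFRASTRUCTURE
-- # ===========================================
--
-- # AWS (if using AWS backend)
-- AWS_ACCESS_KEY_ID=your_aws_access_key_here
-- AWS_SECRET_ACCESS_KEY=your_aws_secret_key_here
-- AWS_REGION=us-east-1
--
-- # Redis (optional caching)
-- REDIS_URL=redis://localhost:6379
-- """
--
--     return content
-- ===== SOURCE B (Python) =====
-- from typing import List
--
-- _HEADER = """# AetherPost Environment Configuration
-- # Copy this file to .env.aetherpost and add your actual API keys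
--
-- # ===========================================
-- # PLATFORM CREDENTIALS
-- # ===========================================
--
-- """
--
-- # Per-platform credential FIELD NAMES; the actual lines are synthesized as
-- # f"{platform.upper()}_{field}=your_{field.lower()}_here\n"
-- _FIELDS = {
--     "twitter": ["API_KEY", "API_SECRET", "ACCESS_TOKEN", "ACCESS_TOKEN_SECRET", "BEARER_TOKEN"],
--     "instagram": ["APP_ID", "APP_SECRET", "ACCESS_TOKEN"],
--     "youtube": ["API_KEY", "CLIENT_ID", "CLIENT_SECRET", "CHANNEL_ID"],
--     "tiktok": ["CLIENT_KEY", "CLIENT_SECRET", "ACCESS_TOKEN"],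
--     "reddit": ["CLIENT_ID", "CLIENT_SECRET", "USERNAME", "PASSWORD"],
-- }
--
-- _AI_HEADER = """
-- # ===========================================
-- # AI SERVICES
-- # ===========================================
--
-- """
--
-- _FOOTER = """
-- # ===========================================
-- # INFRASTRUCTURE
-- # ===========================================
--
-- # AWS (if using AWS backend)
-- AWS_ACCESS_KEY_ID=your_aws_access_key_here
-- AWS_SECRET_ACCESS_KEY=your_aws_secret_key_here
-- AWS_REGION=us-east-1
--
-- # Redis (optional caching)
-- REDIS_URL=redis://localhost:6379
-- """
--
--
-- def _platform_section(p: str) -> str: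
--     """Comment line plus the credential block synthesized from field names."""
--     lines = ["# " + p.upper() + "\n"]
--     for f in _FIELDS.get(p, []):
--         lines.append(p.upper() + "_" + f + "=your_" + f.lower() + "_here\n")
--     if p in _FIELDS:
--         lines.append("\n")
--     return "".join(lines)
--
--
-- def create_env_template(platforms: List[str], ai_services: List[str]) -> str:
--     """Create .env template file (blocks synthesized from field-name data)."""
--     sections = [_HEADER]
--     sections += [_platform_section(p) for p in platforms]
--     sections.append(_AI_HEADER)
--     sections += [s.upper() + "_API_KEY=your_" + s + "_api_key_here\n" for s in ai_services]
--     sections.append(_FOOTER)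
--     return "".join(sections)
-- ===== Notes on version B (the rewrite author's own statement) =====
-- stated objective: alternative
-- what changed: B stores only per-platform credential field-name lists and synthesizes every credential line as '{PLATFORM}_{FIELD}=your_{field_lower}_here', assembling the file from a list of generated sections joined once, instead of A's if/elif chain appending verbatim block texts to a string accumulator.
import Mathlib
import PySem

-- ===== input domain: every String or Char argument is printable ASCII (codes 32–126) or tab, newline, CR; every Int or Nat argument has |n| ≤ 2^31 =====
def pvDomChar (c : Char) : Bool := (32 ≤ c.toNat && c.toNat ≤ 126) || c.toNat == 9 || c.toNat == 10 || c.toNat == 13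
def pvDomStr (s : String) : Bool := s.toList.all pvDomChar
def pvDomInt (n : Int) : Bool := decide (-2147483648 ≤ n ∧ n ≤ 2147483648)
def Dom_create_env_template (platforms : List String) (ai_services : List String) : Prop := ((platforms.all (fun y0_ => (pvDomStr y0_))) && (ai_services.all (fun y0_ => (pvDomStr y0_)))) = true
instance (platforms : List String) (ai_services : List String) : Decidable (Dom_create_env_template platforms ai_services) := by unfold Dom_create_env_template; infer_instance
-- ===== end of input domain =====

-- B stores only per-platform credential FIELD NAMES and synthesizes each line as
-- "{P.upper()}_{field}=your_{field.lower()}_here", instead of A's if/elif chain over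
-- verbatim block texts (objective: alternative — data-driven generation, same cost).

-- ===== PORT A =====
-- literal transliteration of A: string accumulator, if/elif chain per platform
-- (A's 'content += comment' line is inlined into each branch of the chain)
def create_env_template (platforms : List String) (ai_services : List String) : String :=
  let content := "# AetherPost Environment Configuration\n# Copy this file to .env.aetherpost and add your actual API keys\n\n# ===========================================\n# PLATFORM CREDENTIALS\n# ===========================================\n\n"
  let content := platforms.foldl (fun content platform =>
    if platform == "twitter" then content ++ "# " ++ PySem.Str.upper platform ++ "\n" ++ "TWITTER_API_KEY=your_api_key_here\nTWITTER_API_SECRET=your_api_secret_here\nTWITTER_ACCESS_TOKEN=your_access_token_here\nTWITTER_ACCESS_TOKEN_SECRET=your_access_token_secret_here\nTWITTER_BEARER_TOKEN=your_bearer_token_here\n\n"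
    else if platform == "instagram" then content ++ "# " ++ PySem.Str.upper platform ++ "\n" ++ "INSTAGRAM_APP_ID=your_app_id_here\nINSTAGRAM_APP_SECRET=your_app_secret_here\nINSTAGRAM_ACCESS_TOKEN=your_access_token_here\n\n"
    else if platform == "youtube" then content ++ "# " ++ PySem.Str.upper platform ++ "\n" ++ "YOUTUBE_API_KEY=your_api_key_here\nYOUTUBE_CLIENT_ID=your_client_id_here\nYOUTUBE_CLIENT_SECRET=your_client_secret_here\nYOUTUBE_CHANNEL_ID=your_channel_id_here\n\n"
    else if platform == "tiktok" then content ++ "# " ++ PySem.Str.upper platform ++ "\n" ++ "TIKTOK_CLIENT_KEY=your_client_key_here\nTIKTOK_CLIENT_SECRET=your_client_secret_here\nTIKTOK_ACCESS_TOKEN=your_access_token_here\n\n"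
    else if platform == "reddit" then content ++ "# " ++ PySem.Str.upper platform ++ "\n" ++ "REDDIT_CLIENT_ID=your_client_id_here\nREDDIT_CLIENT_SECRET=your_client_secret_here\nREDDIT_USERNAME=your_username_here\nREDDIT_PASSWORD=your_password_here\n\n"
    else content ++ "# " ++ PySem.Str.upper platform ++ "\n") content
  let content := content ++ "\n# ===========================================\n# AI SERVICES\n# ===========================================\n\n"
  let content := ai_services.foldl (fun content service =>
    content ++ PySem.Str.upper service ++ "_API_KEY=your_" ++ service ++ "_api_key_here\n") content
  content ++ "\n# ===========================================\n# INFRASTRUCTURE\n# ===========================================\n\n# AWS (if using AWS backend)\nAWS_ACCESS_KEY_ID=your_aws_access_key_here\nAWS_SECRET_ACCESS_KEY=your_aws_secret_key_here\nAWS_REGION=us-east-1\n\n# Redis (optional caching)\nREDIS_URL=redis://localhost:6379\n"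

-- ===== PORT B =====
-- B-side helpers: constant pieces and the per-platform credential field-name table of Source B
def pvHeader : String := "# AetherPost Environment Configuration\n# Copy this file to .env.aetherpost and add your actual API keys\n\n# ===========================================\n# PLATFORM CREDENTIALS\n# ===========================================\n\n"
def pvAiHeader : String := "\n# ===========================================\n# AI SERVICES\n# ===========================================\n\n"
def pvFooter : String := "\n# ===========================================\n# INFRASTRUCTURE\n# ===========================================\n\n# AWS (if using AWS backend)\nAWS_ACCESS_KEY_ID=your_aws_access_key_here\nAWS_SECRET_ACCESS_KEY=your_aws_secret_key_here\nAWS_REGION=us-east-1\n\n# Redis (optional caching)\nREDIS_URL=redis://localhost:6379\n"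
def pvFields : PySem.Dict String (List String) := PySem.Dict.ofList
  [("twitter", ["API_KEY", "API_SECRET", "ACCESS_TOKEN", "ACCESS_TOKEN_SECRET", "BEARER_TOKEN"]),
   ("instagram", ["APP_ID", "APP_SECRET", "ACCESS_TOKEN"]),
   ("youtube", ["API_KEY", "CLIENT_ID", "CLIENT_SECRET", "CHANNEL_ID"]),
   ("tiktok", ["CLIENT_KEY", "CLIENT_SECRET", "ACCESS_TOKEN"]),
   ("reddit", ["CLIENT_ID", "CLIENT_SECRET", "USERNAME", "PASSWORD"])]

-- _platform_section of Source B: comment line plus the lines synthesized from field names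
def pvPlatformSection (p : String) : String :=
  let lines := ["# " ++ PySem.Str.upper p ++ "\n"]
  let lines := lines ++ (pvFields.getD p []).map
    (fun f => PySem.Str.upper p ++ "_" ++ f ++ "=your_" ++ PySem.Str.lower f ++ "_here\n")
  let lines := if pvFields.contains p then lines ++ ["\n"] else lines
  PySem.Str.join "" lines

-- literal transliteration of B: build the list of sections, then ''.join
def create_env_template_alt (platforms : List String) (ai_services : List String) : String :=
  let sections := [pvHeader]
  let sections := sections ++ platforms.map pvPlatformSection
  let sections := sections ++ [pvAiHeader]
  let sections := sections ++ ai_services.map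
    (fun s => PySem.Str.upper s ++ "_API_KEY=your_" ++ s ++ "_api_key_here\n")
  let sections := sections ++ [pvFooter]
  PySem.Str.join "" sections

-- ===== PRECONDITION & SPEC =====
def Spec_create_env_template (platforms : List String) (ai_services : List String) (out : String) : Prop := out = create_env_template_alt platforms ai_services
instance (platforms : List String) (ai_services : List String) (out : String) : Decidable (Spec_create_env_template platforms ai_services out) := by unfold Spec_create_env_template; infer_instance

-- ===== CLAIM =====
def Claim_equal_create_env_template : Prop := ∀ (platforms : List String) (ai_services : List String), Dom_create_env_template platforms ai_services → Spec_create_env_template platforms ai_services (create_env_template platforms ai_services)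

-- ===== LEMMAS AND PROOFS =====

theorem charsJoinNilCons (x : List Char) (xs : List (List Char)) :
    PySem.Chars.join [] (x::xs) = x ++ PySem.Chars.join [] xs := by
  cases xs <;> simp [PySem.Chars.join, List.intercalate]

theorem joinCons (x : String) (xs : List String) :
    PySem.Str.join "" (x::xs) = x ++ PySem.Str.join "" xs := by
  apply String.toList_injective
  simp [charsJoinNilCons]

theorem joinNil : PySem.Str.join "" ([] : List String) = "" := by
  apply String.toList_injective
  simp [PySem.Chars.join, List.intercalate]

theorem joinAppend (l1 l2 : List String) :
    PySem.Str.join "" (l1 ++ l2) = PySem.Str.join "" l1 ++ PySem.Str.join "" l2 := by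
  induction l1 with
  | nil => simp [joinNil]
  | cons x xs ih => simp [joinCons, ih, String.append_assoc]

-- B's section for each known platform evaluates to A's verbatim block
set_option maxRecDepth 100000 in
theorem section_twitter : pvPlatformSection "twitter" = "# TWITTER\n" ++ "TWITTER_API_KEY=your_api_key_here\nTWITTER_API_SECRET=your_api_secret_here\nTWITTER_ACCESS_TOKEN=your_access_token_here\nTWITTER_ACCESS_TOKEN_SECRET=your_access_token_secret_here\nTWITTER_BEARER_TOKEN=your_bearer_token_here\n\n" := by decide

set_option maxRecDepth 100000 in
theorem section_instagram : pvPlatformSection "instagram" = "# INSTAGRAM\n" ++ "INSTAGRAM_APP_ID=your_app_id_here\nINSTAGRAM_APP_SECRET=your_app_secret_here\nINSTAGRAM_ACCESS_TOKEN=your_access_token_here\n\n" := by decide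

set_option maxRecDepth 100000 in
theorem section_youtube : pvPlatformSection "youtube" = "# YOUTUBE\n" ++ "YOUTUBE_API_KEY=your_api_key_here\nYOUTUBE_CLIENT_ID=your_client_id_here\nYOUTUBE_CLIENT_SECRET=your_client_secret_here\nYOUTUBE_CHANNEL_ID=your_channel_id_here\n\n" := by decide

set_option maxRecDepth 100000 in
theorem section_tiktok : pvPlatformSection "tiktok" = "# TIKTOK\n" ++ "TIKTOK_CLIENT_KEY=your_client_key_here\nTIKTOK_CLIENT_SECRET=your_client_secret_here\nTIKTOK_ACCESS_TOKEN=your_access_token_here\n\n" := by decide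

set_option maxRecDepth 100000 in
theorem section_reddit : pvPlatformSection "reddit" = "# REDDIT\n" ++ "REDDIT_CLIENT_ID=your_client_id_here\nREDDIT_CLIENT_SECRET=your_client_secret_here\nREDDIT_USERNAME=your_username_here\nREDDIT_PASSWORD=your_password_here\n\n" := by decide

-- the literal dict evaluates to its item list
theorem pvFields_mk : pvFields = PySem.Dict.mk
  [("twitter", ["API_KEY", "API_SECRET", "ACCESS_TOKEN", "ACCESS_TOKEN_SECRET", "BEARER_TOKEN"]),
   ("instagram", ["APP_ID", "APP_SECRET", "ACCESS_TOKEN"]),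
   ("youtube", ["API_KEY", "CLIENT_ID", "CLIENT_SECRET", "CHANNEL_ID"]),
   ("tiktok", ["CLIENT_KEY", "CLIENT_SECRET", "ACCESS_TOKEN"]),
   ("reddit", ["CLIENT_ID", "CLIENT_SECRET", "USERNAME", "PASSWORD"])] := by decide

-- for a platform outside the table, B's section is just the comment line
set_option maxHeartbeats 1000000 in
theorem section_other (p : String) (h1 : p ≠ "twitter") (h2 : p ≠ "instagram")
    (h3 : p ≠ "youtube") (h4 : p ≠ "tiktok") (h5 : p ≠ "reddit") :
    pvPlatformSection p = "# " ++ PySem.Str.upper p ++ "\n" := by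
  have hget : pvFields.get? p = none := by
    rw [pvFields_mk]
    simp [beq_iff_eq, Ne.symm h1, Ne.symm h2, Ne.symm h3, Ne.symm h4, Ne.symm h5,
          PySem.Dict.get?]
  have hcon : pvFields.contains p = false := by
    rw [PySem.Dict.contains_eq_isSome_get?, hget]; rfl
  unfold pvPlatformSection
  rw [PySem.Dict.getD_eq_get?_getD, hget, hcon]
  simp [joinCons, joinNil]

-- A's if/elif step equals appending B's synthesized section
set_option maxHeartbeats 1000000 in
set_option maxRecDepth 100000 in
theorem stepA_eq (c p : String) :
    (if p == "twitter" then c ++ "# " ++ PySem.Str.upper p ++ "\n" ++ "TWITTER_API_KEY=your_api_key_here\nTWITTER_API_SECRET=your_api_secret_here\nTWITTER_ACCESS_TOKEN=your_access_token_here\nTWITTER_ACCESS_TOKEN_SECRET=your_access_token_secret_here\nTWITTER_BEARER_TOKEN=your_bearer_token_here\n\n"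
    else if p == "instagram" then c ++ "# " ++ PySem.Str.upper p ++ "\n" ++ "INSTAGRAM_APP_ID=your_app_id_here\nINSTAGRAM_APP_SECRET=your_app_secret_here\nINSTAGRAM_ACCESS_TOKEN=your_access_token_here\n\n"
    else if p == "youtube" then c ++ "# " ++ PySem.Str.upper p ++ "\n" ++ "YOUTUBE_API_KEY=your_api_key_here\nYOUTUBE_CLIENT_ID=your_client_id_here\nYOUTUBE_CLIENT_SECRET=your_client_secret_here\nYOUTUBE_CHANNEL_ID=your_channel_id_here\n\n"
    else if p == "tiktok" then c ++ "# " ++ PySem.Str.upper p ++ "\n" ++ "TIKTOK_CLIENT_KEY=your_client_key_here\nTIKTOK_CLIENT_SECRET=your_client_secret_here\nTIKTOK_ACCESS_TOKEN=your_access_token_here\n\n"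
    else if p == "reddit" then c ++ "# " ++ PySem.Str.upper p ++ "\n" ++ "REDDIT_CLIENT_ID=your_client_id_here\nREDDIT_CLIENT_SECRET=your_client_secret_here\nREDDIT_USERNAME=your_username_here\nREDDIT_PASSWORD=your_password_here\n\n"
    else c ++ "# " ++ PySem.Str.upper p ++ "\n")
    = c ++ pvPlatformSection p := by
  rcases eq_or_ne p "twitter" with h | h1
  · subst h; rw [section_twitter]; simp [String.append_assoc]; decide
  rcases eq_or_ne p "instagram" with h | h2
  · subst h; rw [section_instagram]; simp [String.append_assoc]; decide
  rcases eq_or_ne p "youtube" with h | h3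
  · subst h; rw [section_youtube]; simp [String.append_assoc]; decide
  rcases eq_or_ne p "tiktok" with h | h4
  · subst h; rw [section_tiktok]; simp [String.append_assoc]; decide
  rcases eq_or_ne p "reddit" with h | h5
  · subst h; rw [section_reddit]; simp [String.append_assoc]; decide
  rw [section_other p h1 h2 h3 h4 h5]
  simp [beq_iff_eq, h1, h2, h3, h4, h5, String.append_assoc]

-- A's platform loop is the join of B's per-platform sections
set_option maxHeartbeats 1000000 in
theorem foldP (l : List String) (c : String) :
    l.foldl (fun content platform =>
      if platform == "twitter" then content ++ "# " ++ PySem.Str.upper platform ++ "\n" ++ "TWITTER_API_KEY=your_api_key_here\nTWITTER_API_SECRET=your_api_secret_here\nTWITTER_ACCESS_TOKEN=your_access_token_here\nTWITTER_ACCESS_TOKEN_SECRET=your_access_token_secret_here\nTWITTER_BEARER_TOKEN=your_bearer_token_here\n\n"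
    else if platform == "instagram" then content ++ "# " ++ PySem.Str.upper platform ++ "\n" ++ "INSTAGRAM_APP_ID=your_app_id_here\nINSTAGRAM_APP_SECRET=your_app_secret_here\nINSTAGRAM_ACCESS_TOKEN=your_access_token_here\n\n"
    else if platform == "youtube" then content ++ "# " ++ PySem.Str.upper platform ++ "\n" ++ "YOUTUBE_API_KEY=your_api_key_here\nYOUTUBE_CLIENT_ID=your_client_id_here\nYOUTUBE_CLIENT_SECRET=your_client_secret_here\nYOUTUBE_CHANNEL_ID=your_channel_id_here\n\n"
    else if platform == "tiktok" then content ++ "# " ++ PySem.Str.upper platform ++ "\n" ++ "TIKTOK_CLIENT_KEY=your_client_key_here\nTIKTOK_CLIENT_SECRET=your_client_secret_here\nTIKTOK_ACCESS_TOKEN=your_access_token_here\n\n"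
    else if platform == "reddit" then content ++ "# " ++ PySem.Str.upper platform ++ "\n" ++ "REDDIT_CLIENT_ID=your_client_id_here\nREDDIT_CLIENT_SECRET=your_client_secret_here\nREDDIT_USERNAME=your_username_here\nREDDIT_PASSWORD=your_password_here\n\n"
    else content ++ "# " ++ PySem.Str.upper platform ++ "\n") c
    = c ++ PySem.Str.join "" (l.map pvPlatformSection) := by
  induction l generalizing c with
  | nil => simp [joinNil]
  | cons x xs ih =>
    rw [List.foldl_cons, ih, List.map_cons, joinCons, stepA_eq, String.append_assoc]

-- A's AI-services loop is the join of B's service lines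
theorem foldS (l : List String) (c : String) :
    l.foldl (fun content service =>
      content ++ PySem.Str.upper service ++ "_API_KEY=your_" ++ service ++ "_api_key_here\n") c
    = c ++ PySem.Str.join "" (l.map (fun s => PySem.Str.upper s ++ "_API_KEY=your_" ++ s ++ "_api_key_here\n")) := by
  induction l generalizing c with
  | nil => simp [joinNil]
  | cons x xs ih => rw [List.foldl_cons, ih, List.map_cons, joinCons]; simp [String.append_assoc]

-- ===== VERDICT =====
set_option maxHeartbeats 1000000 in
theorem create_env_template_spec : Claim_equal_create_env_template := by
  unfold Claim_equal_create_env_template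
  intro platforms ai_services _
  unfold Spec_create_env_template
  show create_env_template platforms ai_services = create_env_template_alt platforms ai_services
  rw [create_env_template, create_env_template_alt, foldP, foldS]
  simp [joinAppend, joinCons, joinNil, pvHeader, pvAiHeader, pvFooter, String.append_assoc]
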